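-- pv_equiv track=rewrite | github.com/connorthecoder/TechUpSchool | studentdirectory.py | get_students_by_programming_languages
-- ===== SOURCE A (Python) =====
-- students =  [{ "name": "Connor", "age": 20, "email": "connor@mail.com", "language": ["Python", "JavaScript"],"mentor":"John" },
--  { "name": "James", "age": 22, "email": "james@mail.com","language": ["Python", "C++"],"mentor":"John" },
--  { "name": "Mary", "age": 21, "email": "mary@mail.com", "language": ["Python","JavaScript"],"mentor":"Jill" },
--  {"name": "Patrick", "age": 19, "email": "Patrick@mail.com", "language": ["C++","JavaScript"],"mentor":"Jill" },
--  {"name": "Jenny", "age": 23, "email": "jenny@mail.com", "language": ["Java","C#"],"mentor":"Jill" }]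
--
-- def get_students_by_programming_languages(Languages):
--     count=0
--     studentlist=[]
--     for i in students:
--         studentLanguages=students[count]["language"]
--         if Languages.lower() in [x.lower() for x in studentLanguages]:
--             studentlist.append(students[count]["name"])
--         count=count+1
--
--     return studentlist
-- ===== SOURCE B (Python) =====
-- students =  [{ "name": "Connor", "age": 20, "email": "connor@mail.com", "language": ["Python", "JavaScript"],"mentor":"John" },
--  { "name": "James", "age": 22, "email": "james@mail.com","language": ["Python", "C++"],"mentor":"John" },
--  { "name": "Mary", "age": 21, "email": "mary@mail.com", "language": ["Python","JavaScript"],"mentor":"Jill" },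
--  {"name": "Patrick", "age": 19, "email": "Patrick@mail.com", "language": ["C++","JavaScript"],"mentor":"Jill" },
--  {"name": "Jenny", "age": 23, "email": "jenny@mail.com", "language": ["Java","C#"],"mentor":"Jill" }]
--
-- # Inverted index: lowercased language -> names of students who know it, in student order.
-- _index = {}
-- for _s in students:
--     for _lang in _s["language"]:
--         _index.setdefault(_lang.lower(), []).append(_s["name"])
--
-- def get_students_by_programming_languages(Languages):
--     return _index.get(Languages.lower(), [])
-- ===== Notes on version B (the rewrite author's own statement) =====
-- stated objective: faster
-- what changed: Replaces the per-call scan over all students (with a per-student lowercasing of every language list) by a module-level inverted index built once (lowercased language -> names in student order), so each call is a single dict lookup.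
import Mathlib
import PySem

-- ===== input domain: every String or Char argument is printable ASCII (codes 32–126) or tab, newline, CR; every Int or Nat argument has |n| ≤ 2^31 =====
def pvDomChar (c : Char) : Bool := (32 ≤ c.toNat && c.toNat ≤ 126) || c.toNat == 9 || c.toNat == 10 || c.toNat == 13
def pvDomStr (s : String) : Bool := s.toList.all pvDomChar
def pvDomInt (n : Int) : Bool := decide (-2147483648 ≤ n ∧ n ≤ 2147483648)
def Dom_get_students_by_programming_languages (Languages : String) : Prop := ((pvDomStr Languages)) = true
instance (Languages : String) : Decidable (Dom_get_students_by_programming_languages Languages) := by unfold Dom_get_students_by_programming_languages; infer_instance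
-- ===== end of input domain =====

-- B replaces A's per-call scan over the student records by a precomputed inverted index
-- (lowercased language -> names in student order), so the call is a single table lookup.

-- the module-level `students` table (only the fields the function reads are relevant,
-- but all are kept for faithfulness)
structure PvStudent where
  name : String
  age : Int
  email : String
  language : List String
  mentor : String
deriving Repr, DecidableEq

def pvStudents : List PvStudent :=
  [⟨"Connor", 20, "connor@mail.com", ["Python", "JavaScript"], "John"⟩,
   ⟨"James", 22, "james@mail.com", ["Python", "C++"], "John"⟩,
   ⟨"Mary", 21, "mary@mail.com", ["Python", "JavaScript"], "Jill"⟩,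
   ⟨"Patrick", 19, "Patrick@mail.com", ["C++", "JavaScript"], "Jill"⟩,
   ⟨"Jenny", 23, "jenny@mail.com", ["Java", "C#"], "Jill"⟩]

-- ===== PORT A =====
-- loop `for i in students` carrying `count` and `studentlist`; `students[count]` via pyGet?
-- (always in range here, so getD with a dummy student is exact)
def get_students_by_programming_languages (Languages : String) : List String :=
  (pvStudents.foldl
    (fun (st : Int × List String) (_i : PvStudent) =>
      let count := st.1
      let studentlist := st.2
      let studentLanguages := ((PySem.List.pyGet? pvStudents count).getD ⟨"", 0, "", [], ""⟩).language
      let studentlist :=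
        if (studentLanguages.map PySem.Str.lower).contains (PySem.Str.lower Languages)
        then studentlist ++ [((PySem.List.pyGet? pvStudents count).getD ⟨"", 0, "", [], ""⟩).name]
        else studentlist
      (count + 1, studentlist))
    (0, [])).2

-- ===== PORT B =====
-- the module-level inverted index, built once: for each student, for each language,
-- append the student's name under the lowercased language key (setdefault+append)
def pvIndex : PySem.Dict String (List String) :=
  pvStudents.foldl
    (fun d s =>
      s.language.foldl
        (fun d lang =>
          let key := PySem.Str.lower lang
          d.insert key (d.getD key [] ++ [s.name]))
        d)
    PySem.Dict.empty

def get_students_by_programming_languages_alt (Languages : String) : List String :=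
  pvIndex.getD (PySem.Str.lower Languages) []

-- ===== PRECONDITION & SPEC =====
def Spec_get_students_by_programming_languages (Languages : String) (out : List String) : Prop := out = get_students_by_programming_languages_alt Languages
instance (Languages : String) (out : List String) : Decidable (Spec_get_students_by_programming_languages Languages out) := by unfold Spec_get_students_by_programming_languages; infer_instance

-- ===== CLAIM (what is proved, stated in full; the proofs are below) =====
def Claim_equal_get_students_by_programming_languages : Prop := ∀ (Languages : String), Dom_get_students_by_programming_languages Languages → Spec_get_students_by_programming_languages Languages (get_students_by_programming_languages Languages)

-- ===== LEMMAS AND PROOFS =====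

-- both sides as functions of the lowercased query L, proved equal by case analysis on
-- which of the five index keys L is
theorem pv_core_eq (L : String) :
    (pvStudents.foldl
      (fun (st : Int × List String) (_i : PvStudent) =>
        (st.1 + 1,
         if (((PySem.List.pyGet? pvStudents st.1).getD ⟨"", 0, "", [], ""⟩).language.map PySem.Str.lower).contains L
         then st.2 ++ [((PySem.List.pyGet? pvStudents st.1).getD ⟨"", 0, "", [], ""⟩).name]
         else st.2))
      (0, [])).2 = pvIndex.getD L [] := by
  by_cases h1 : L = "python"; · subst h1; decide
  by_cases h2 : L = "javascript"; · subst h2; decide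
  by_cases h3 : L = "c++"; · subst h3; decide
  by_cases h4 : L = "java"; · subst h4; decide
  by_cases h5 : L = "c#"; · subst h5; decide
  have hidx : pvIndex = PySem.Dict.mk
      [("python", ["Connor", "James", "Mary"]), ("javascript", ["Connor", "Mary", "Patrick"]),
       ("c++", ["James", "Patrick"]), ("java", ["Jenny"]), ("c#", ["Jenny"])] := by decide
  have e1 : PySem.Str.lower "Python" = "python" := by decide
  have e2 : PySem.Str.lower "JavaScript" = "javascript" := by decide
  have e3 : PySem.Str.lower "C++" = "c++" := by decide
  have e4 : PySem.Str.lower "Java" = "java" := by decide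
  have e5 : PySem.Str.lower "C#" = "c#" := by decide
  have b1 : ("python" == L) = false := by simpa using Ne.symm h1
  have b2 : ("javascript" == L) = false := by simpa using Ne.symm h2
  have b3 : ("c++" == L) = false := by simpa using Ne.symm h3
  have b4 : ("java" == L) = false := by simpa using Ne.symm h4
  have b5 : ("c#" == L) = false := by simpa using Ne.symm h5
  simp [pvStudents, PySem.List.pyGet?, PySem.List.pyIdx?, hidx, PySem.Dict.getD,
        PySem.Dict.get?, List.find?, List.foldl, e1, e2, e3, e4, e5,
        Ne.symm h1, Ne.symm h2, Ne.symm h3, Ne.symm h4, Ne.symm h5, b1, b2, b3, b4, b5]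

-- ===== VERDICT (by name: the statement is the Claim_ definition above) =====
theorem get_students_by_programming_languages_spec : Claim_equal_get_students_by_programming_languages := by
  intro Languages _
  unfold Spec_get_students_by_programming_languages get_students_by_programming_languages
         get_students_by_programming_languages_alt
  exact pv_core_eq (PySem.Str.lower Languages)
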